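-- pv_equiv track=rewrite | github.com/Lukassolna/Advent-of-Code-2023 | Day3/main.py | find_grouped_numbers_in_array
-- ===== SOURCE A (Python) =====
-- def find_grouped_numbers_in_array(array):
--     numbers = []  # List to store found numbers
--     for row in array:
--         current_number = ''  # String to build the current number
--         for char in row:
--             if char.isdigit():
--                 current_number += char
--             else:
--                 if current_number:
--                     numbers.append(current_number)
--                     current_number = ''  # Reset current number for the next group
--         if current_number:
--             numbers.append(current_number)
--     return numbers
-- ===== SOURCE B (Python) =====
-- import re
--
-- def find_grouped_numbers_in_array(array):
--     numbers = []
--     for row in array: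
--         numbers.extend(re.findall(r'\d+', row))
--     return numbers
-- ===== Notes on version B (the rewrite author's own statement) =====
-- stated objective: idiomatic
-- what changed: Replaces the manual character scan with a digit-accumulator string and flush-on-boundary by a regex findall of contiguous digit runs per row, extending the result list.
import Mathlib
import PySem

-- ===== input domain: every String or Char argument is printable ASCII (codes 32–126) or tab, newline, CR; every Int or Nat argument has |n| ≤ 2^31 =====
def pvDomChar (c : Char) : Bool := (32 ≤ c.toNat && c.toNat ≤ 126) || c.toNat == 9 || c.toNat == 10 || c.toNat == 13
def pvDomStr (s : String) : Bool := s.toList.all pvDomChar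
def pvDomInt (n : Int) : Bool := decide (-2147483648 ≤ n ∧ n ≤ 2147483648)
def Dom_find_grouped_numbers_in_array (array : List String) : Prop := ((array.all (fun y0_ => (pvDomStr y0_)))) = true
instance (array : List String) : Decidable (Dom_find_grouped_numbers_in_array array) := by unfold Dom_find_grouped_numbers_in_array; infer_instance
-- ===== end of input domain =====

-- B replaces A's manual per-character scan with flush-on-boundary by extracting
-- contiguous digit runs per row (regex findall in Python); same result, more idiomatic.


-- ===== PORT A =====
-- inner character loop of A: state is (numbers, current_number)
def pvLoopA (nums : List String) (cur : List Char) : List Char → List String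
  | [] => if cur ≠ [] then nums ++ [String.mk cur] else nums
  | c :: cs =>
      if c.isDigit then pvLoopA nums (cur ++ [c]) cs
      else pvLoopA (if cur ≠ [] then nums ++ [String.mk cur] else nums) [] cs

def find_grouped_numbers_in_array (array : List String) : List String :=
  array.foldl (fun nums row => pvLoopA nums [] row.toList) []

-- ===== PORT B =====
-- contiguous digit runs of a row (what re.findall(r'\d+', row) returns)
def pvRuns : List Char → List String
  | [] => []
  | c :: cs =>
      if c.isDigit then
        String.mk (c :: cs.takeWhile Char.isDigit) :: pvRuns (cs.dropWhile Char.isDigit)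
      else pvRuns cs
termination_by cs => cs.length
decreasing_by
  · simpa using Nat.lt_succ_of_le (List.length_dropWhile_le _ _)
  · simp

def find_grouped_numbers_in_array_alt (array : List String) : List String :=
  array.foldl (fun nums row => nums ++ pvRuns row.toList) []

-- ===== PRECONDITION & SPEC =====
def Spec_find_grouped_numbers_in_array (array : List String) (out : List String) : Prop := out = find_grouped_numbers_in_array_alt array
instance (array : List String) (out : List String) : Decidable (Spec_find_grouped_numbers_in_array array out) := by unfold Spec_find_grouped_numbers_in_array; infer_instance

-- ===== CLAIM (what is proved, stated in full; the proofs are below) =====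
def Claim_equal_find_grouped_numbers_in_array : Prop := ∀ (array : List String), Dom_find_grouped_numbers_in_array array → Spec_find_grouped_numbers_in_array array (find_grouped_numbers_in_array array)

-- ===== LEMMAS AND PROOFS =====

-- invariant of A's inner loop: pending digits `cur` head the current run
theorem pvLoopA_runs : ∀ (cs : List Char) (nums : List String) (cur : List Char),
    pvLoopA nums cur cs =
      if cur = [] then nums ++ pvRuns cs
      else nums ++ [String.mk (cur ++ cs.takeWhile Char.isDigit)] ++ pvRuns (cs.dropWhile Char.isDigit) := by
  intro cs
  induction cs with
  | nil =>
      intro nums cur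
      simp only [pvLoopA, pvRuns, List.takeWhile_nil, List.dropWhile_nil]
      split_ifs with h <;> simp [h] <;> simp_all
  | cons c cs ih =>
      intro nums cur
      by_cases hc : c.isDigit
      · simp only [pvLoopA, hc, if_pos]
        rw [ih]
        have hne : cur ++ [c] ≠ [] := by simp
        rw [if_neg hne]
        by_cases h : cur = []
        · subst h
          simp [pvRuns, hc]
        · rw [if_neg h]
          simp [pvRuns, List.takeWhile_cons, List.dropWhile_cons, hc]
      · simp only [pvLoopA, hc, Bool.false_eq_true, if_false]
        rw [ih]
        simp only [if_pos rfl]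
        by_cases h : cur = []
        · simp [h, pvRuns, hc]
        · rw [if_neg h, if_pos h]
          simp [pvRuns, List.takeWhile_cons, List.dropWhile_cons, hc]

theorem pvLoopA_row (nums : List String) (cs : List Char) :
    pvLoopA nums [] cs = nums ++ pvRuns cs := by
  rw [pvLoopA_runs]; simp

theorem foldl_congr_rows (array : List String) :
    ∀ (nums : List String),
      array.foldl (fun nums row => pvLoopA nums [] row.toList) nums =
      array.foldl (fun nums row => nums ++ pvRuns row.toList) nums := by
  induction array with
  | nil => intro _; rfl
  | cons r rs ih => intro nums; simp only [List.foldl_cons, pvLoopA_row, ih]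

-- ===== VERDICT (by name: the statement is the Claim_ definition above) =====
theorem find_grouped_numbers_in_array_spec : Claim_equal_find_grouped_numbers_in_array := by
  intro array _
  unfold Spec_find_grouped_numbers_in_array find_grouped_numbers_in_array find_grouped_numbers_in_array_alt
  exact foldl_congr_rows array []
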